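-- pv_equiv track=rewrite | github.com/Ulises-Rosas/fishlifeqc | fishlifeqc/symtests.py | trim_columns
-- ===== SOURCE A (Python) =====
-- def trim_columns(to_rm, aln, seq_len):
--
--     if to_rm:
--         trimmed = {}
--         for k,v in aln.items():
--             mystr = ""
--             for i in range(0, seq_len, 3):
--
--                 F = '' if 'pos1' in to_rm else v[i]
--                 S = '' if 'pos2' in to_rm else v[i + 1]
--                 T = '' if 'pos3' in to_rm else v[i + 2]
--                 mystr += (F + S + T)
--
--             trimmed[k] = mystr
--
--         trimmed_len = len(next(iter(trimmed.values())))
--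
--         return (trimmed, trimmed_len)
--
--     else:
--         return (aln, seq_len)
-- ===== SOURCE B (Python) =====
-- def trim_columns(to_rm, aln, seq_len):
--     if not to_rm:
--         return (aln, seq_len)
--     n = len(range(0, seq_len, 3))
--     mask = [p not in to_rm for p in ('pos1', 'pos2', 'pos3')] * n
--     trimmed = {}
--     for k, v in aln.items():
--         trimmed[k] = ''.join(c for keep, c in zip(mask, v[:3 * n]) if keep)
--     trimmed_len = len(next(iter(trimmed.values())))
--     return (trimmed, trimmed_len)
-- ===== Notes on version B (the rewrite author's own statement) =====
-- stated objective: alternative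
-- what changed: B replaces A's per-codon indexed loop with three membership tests per codon by a precomputed repeated boolean keep-mask and a single zip-filter over the flat prefix v[:3*n], selecting characters by mask instead of computing codon indices.
import Mathlib
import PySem

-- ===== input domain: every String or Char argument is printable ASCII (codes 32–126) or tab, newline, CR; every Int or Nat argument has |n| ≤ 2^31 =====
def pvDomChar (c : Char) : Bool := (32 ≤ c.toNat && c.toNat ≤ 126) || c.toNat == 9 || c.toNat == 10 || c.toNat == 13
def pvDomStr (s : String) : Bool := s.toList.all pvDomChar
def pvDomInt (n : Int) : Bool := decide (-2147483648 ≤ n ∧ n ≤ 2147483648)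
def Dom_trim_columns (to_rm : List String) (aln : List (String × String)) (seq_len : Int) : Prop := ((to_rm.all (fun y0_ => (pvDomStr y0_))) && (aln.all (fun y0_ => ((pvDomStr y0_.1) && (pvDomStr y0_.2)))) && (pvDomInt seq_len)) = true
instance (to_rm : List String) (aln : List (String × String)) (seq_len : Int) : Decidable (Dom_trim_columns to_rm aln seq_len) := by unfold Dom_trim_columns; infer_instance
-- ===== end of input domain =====

-- B builds a repeated boolean keep-mask once and selects characters by a single zip-filter over the flat prefix, instead of A's per-codon indexed loop with three membership tests per codon (objective: alternative).


-- ===== PORT A =====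
-- inner loop: mystr += (F + S + T); v[i] etc. via pyGetD ('?' default is never read inside Pre_)
def trimRowA (to_rm : List String) (seq_len : Int) (v : List Char) : List Char :=
  (PySem.List.pyRange 0 seq_len 3).foldl (fun mystr i =>
    mystr ++ (((if to_rm.contains "pos1" then [] else [PySem.List.pyGetD v i '?']) ++
               (if to_rm.contains "pos2" then [] else [PySem.List.pyGetD v (i + 1) '?'])) ++
              (if to_rm.contains "pos3" then [] else [PySem.List.pyGetD v (i + 2) '?']))) []

def trim_columns (to_rm : List String) (aln : List (String × String)) (seq_len : Int) : (List (String × String)) × Int :=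
  if to_rm = [] then (aln, seq_len)
  else
    let trimmed := aln.foldl (fun d (p : String × String) =>
      PySem.Dict.insert d p.1 (String.ofList (trimRowA to_rm seq_len p.2.toList))) PySem.Dict.empty
    -- len(next(iter(trimmed.values()))): first value's length; [] = StopIteration, excluded by Pre_
    (trimmed.items, match trimmed.values with | [] => (0 : Int) | w :: _ => PySem.Str.len w)

-- ===== PORT B =====
-- mask = [p not in to_rm for p in ('pos1','pos2','pos3')] * n   (Python list repetition)
def maskB (to_rm : List String) (n : Nat) : List Bool :=
  (List.replicate n (["pos1", "pos2", "pos3"].map (fun p => !to_rm.contains p))).flatten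

-- ''.join(c for keep, c in zip(mask, v[:3*n]) if keep); v[:3*n] via PySem slice
def trimRowB (to_rm : List String) (n : Nat) (v : List Char) : List Char :=
  (((maskB to_rm n).zip (PySem.List.slice v none (some ((3 * n : Nat) : Int)))).filter (·.1)).map (·.2)

def trim_columns_alt (to_rm : List String) (aln : List (String × String)) (seq_len : Int) : (List (String × String)) × Int :=
  if to_rm = [] then (aln, seq_len)
  else
    let n := (PySem.List.pyRange 0 seq_len 3).length   -- n = len(range(0, seq_len, 3))
    let trimmed := aln.foldl (fun d (p : String × String) =>
      PySem.Dict.insert d p.1 (String.ofList (trimRowB to_rm n p.2.toList))) PySem.Dict.empty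
    (trimmed.items, match trimmed.values with | [] => (0 : Int) | w :: _ => PySem.Str.len w)

-- ===== PRECONDITION & SPEC =====
-- Pre_ excludes exactly where Python A raises: StopIteration on an empty aln (with to_rm nonempty) and
-- IndexError when a kept codon position of the last codon (indices up to 3*((seq_len-1)//3)+2) falls outside a sequence.
def Pre_trim_columns (to_rm : List String) (aln : List (String × String)) (seq_len : Int) : Prop :=
  to_rm ≠ [] →
    aln ≠ [] ∧ (0 < seq_len → ∀ p ∈ aln,
      (("pos1" ∈ to_rm) ∨ 3 * PySem.Int.floordiv (seq_len - 1) 3 < (p.2.toList.length : Int)) ∧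
      (("pos2" ∈ to_rm) ∨ 3 * PySem.Int.floordiv (seq_len - 1) 3 + 1 < (p.2.toList.length : Int)) ∧
      (("pos3" ∈ to_rm) ∨ 3 * PySem.Int.floordiv (seq_len - 1) 3 + 2 < (p.2.toList.length : Int)))
instance (to_rm : List String) (aln : List (String × String)) (seq_len : Int) : Decidable (Pre_trim_columns to_rm aln seq_len) := by unfold Pre_trim_columns; infer_instance

def pvWitness_trim_columns : List String × (List (String × String)) × Int := (["pos2"], [("a", "ACG")], 3)

def Spec_trim_columns (to_rm : List String) (aln : List (String × String)) (seq_len : Int) (out : (List (String × String)) × Int) : Prop := out = trim_columns_alt to_rm aln seq_len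
instance (to_rm : List String) (aln : List (String × String)) (seq_len : Int) (out : (List (String × String)) × Int) : Decidable (Spec_trim_columns to_rm aln seq_len out) := by unfold Spec_trim_columns; infer_instance

-- ===== CLAIM (what is proved, stated in full; the proofs are below) =====
def Claim_equal_trim_columns : Prop := ∀ (to_rm : List String) (aln : List (String × String)) (seq_len : Int), Dom_trim_columns to_rm aln seq_len → Pre_trim_columns to_rm aln seq_len → Spec_trim_columns to_rm aln seq_len (trim_columns to_rm aln seq_len)

-- ===== LEMMAS AND PROOFS =====

-- zip distributes over an append on the left (general, unconditioned)
theorem zip_append_drop {α β : Type} (l₁ r₁ : List α) (l₂ : List β) :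
    (l₁ ++ r₁).zip l₂ = l₁.zip l₂ ++ r₁.zip (l₂.drop l₁.length) := by
  induction l₁ generalizing l₂ with
  | nil => simp
  | cons a t ih => cases l₂ with
    | nil => simp
    | cons b u => simp [ih]

-- zip only reads the first |l₁| elements of l₂
theorem zip_take_length {α β : Type} (l₁ : List α) (l₂ : List β) :
    l₁.zip (l₂.take l₁.length) = l₁.zip l₂ := by
  induction l₁ generalizing l₂ with
  | nil => simp
  | cons a t ih => cases l₂ with
    | nil => simp
    | cons b u => simp [ih]

-- head codon: finite case analysis on the first three characters and the three flags
theorem head_codon (k1 k2 k3 : Bool) (v : List Char)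
    (h1 : k1 = true → 0 < v.length) (h2 : k2 = true → 1 < v.length) (h3 : k3 = true → 2 < v.length) :
    ((([k1, k2, k3]).zip v).filter (·.1)).map (·.2)
      = ((if k1 then [v.getD 0 '?'] else []) ++ (if k2 then [v.getD 1 '?'] else [])) ++
        (if k3 then [v.getD 2 '?'] else []) := by
  rcases v with _ | ⟨a, _ | ⟨b, _ | ⟨c, t⟩⟩⟩ <;> cases k1 <;> cases k2 <;> cases k3 <;> simp_all

-- the canonical row: for each codon j < n, the kept characters (by getD) in offset order
def rowC (k1 k2 k3 : Bool) (n : Nat) (v : List Char) : List Char :=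
  (List.range n).flatMap (fun j =>
    ((if k1 then [v.getD (3 * j) '?'] else []) ++ (if k2 then [v.getD (3 * j + 1) '?'] else [])) ++
    (if k3 then [v.getD (3 * j + 2) '?'] else []))

-- B's mask-filter row equals the canonical row, given that the kept offsets of the last codon are in range
theorem maskfilt_eq (k1 k2 k3 : Bool) : ∀ (n : Nat) (v : List Char),
    (0 < n → (k1 = true → 3 * (n - 1) < v.length) ∧ (k2 = true → 3 * (n - 1) + 1 < v.length) ∧
             (k3 = true → 3 * (n - 1) + 2 < v.length)) →
    ((((List.replicate n [k1, k2, k3]).flatten).zip (v.take (3 * n))).filter (·.1)).map (·.2)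
      = rowC k1 k2 k3 n v := by
  intro n
  induction n with
  | zero => intro v _; simp [rowC]
  | succ m ih =>
    intro v h
    have h' := h (Nat.succ_pos m)
    have hsplit : (((List.replicate (m + 1) [k1, k2, k3]).flatten).zip (v.take (3 * (m + 1))))
        = ([k1, k2, k3].zip v) ++ (((List.replicate m [k1, k2, k3]).flatten).zip ((v.drop 3).take (3 * m))) := by
      rw [List.replicate_succ, List.flatten_cons, zip_append_drop]
      congr 1
      · have h3 : (v.take (3 * (m + 1))).take ([k1, k2, k3].length) = v.take ([k1, k2, k3].length) := by
          rw [List.take_take]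
          congr 1
        rw [← zip_take_length [k1, k2, k3] (v.take (3 * (m + 1))), h3, zip_take_length]
      · congr 1
        show (v.take (3 * (m + 1))).drop 3 = (v.drop 3).take (3 * m)
        rw [List.drop_take]
        congr 1
    rw [hsplit, List.filter_append, List.map_append]
    have hrec : (((((List.replicate m [k1, k2, k3]).flatten).zip ((v.drop 3).take (3 * m))).filter (·.1)).map (·.2))
        = rowC k1 k2 k3 m (v.drop 3) := by
      apply ih
      intro hm
      refine ⟨fun hk => ?_, fun hk => ?_, fun hk => ?_⟩ <;>
        [have := h'.1 hk; have := h'.2.1 hk; have := h'.2.2 hk] <;>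
        simp only [List.length_drop] <;> omega
    rw [hrec]
    have hshift : rowC k1 k2 k3 (m + 1) v = (((if k1 then [v.getD 0 '?'] else []) ++ (if k2 then [v.getD 1 '?'] else [])) ++
        (if k3 then [v.getD 2 '?'] else [])) ++ rowC k1 k2 k3 m (v.drop 3) := by
      unfold rowC
      rw [List.range_succ_eq_map, List.flatMap_cons, List.flatMap_map]
      simp only [Nat.mul_zero, Nat.zero_add]
      congr 1
      apply List.flatMap_congr
      intro j _
      have g : ∀ (i : Nat), (v.drop 3).getD i '?' = v.getD (3 + i) '?' := by
        intro i; simp [List.getD_eq_getElem?_getD, List.getElem?_drop]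
      simp only [g]
      have i0 : 3 * (j + 1) = 3 + 3 * j := by ring
      rw [i0]
      simp [Nat.add_assoc]
    rw [hshift]
    congr 1
    exact head_codon k1 k2 k3 v (fun hk => by have := h'.1 hk; omega)
      (fun hk => by have := h'.2.1 hk; omega) (fun hk => by have := h'.2.2 hk; omega)

-- A's indexed row equals the canonical row (no range condition: pyGetD and getD share the default)
theorem rowA_eq (to_rm : List String) (seq_len : Int) (v : List Char) :
    trimRowA to_rm seq_len v
      = rowC (!to_rm.contains "pos1") (!to_rm.contains "pos2") (!to_rm.contains "pos3")
          ((PySem.List.pyRange 0 seq_len 3).length) v := by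
  unfold trimRowA rowC
  rw [PySem.List.foldl_append_eq_flatMap, List.nil_append]
  rw [PySem.List.pyRange_of_pos 0 seq_len (by norm_num)]
  rw [List.length_map, List.length_range, List.flatMap_map]
  apply List.flatMap_congr
  intro j _
  have e0 : (0 : Int) + 3 * (j : Int) = ((3 * j : Nat) : Int) := by push_cast; ring
  have e1 : ((3 * j : Nat) : Int) + 1 = ((3 * j + 1 : Nat) : Int) := by push_cast; ring
  have e2 : ((3 * j : Nat) : Int) + 2 = ((3 * j + 2 : Nat) : Int) := by push_cast; ring
  rw [e0, e1, e2]
  simp only [PySem.List.pyGetD_natCast]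
  cases hc1 : to_rm.contains "pos1" <;> cases hc2 : to_rm.contains "pos2" <;>
    cases hc3 : to_rm.contains "pos3" <;> simp

-- B's row in terms of the canonical row, under Pre_'s in-range condition for this sequence
theorem rowB_eq (to_rm : List String) (seq_len : Int) (v : List Char)
    (h : 0 < (PySem.List.pyRange 0 seq_len 3).length →
      ((!to_rm.contains "pos1") = true → 3 * ((PySem.List.pyRange 0 seq_len 3).length - 1) < v.length) ∧
      ((!to_rm.contains "pos2") = true → 3 * ((PySem.List.pyRange 0 seq_len 3).length - 1) + 1 < v.length) ∧
      ((!to_rm.contains "pos3") = true → 3 * ((PySem.List.pyRange 0 seq_len 3).length - 1) + 2 < v.length)) :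
    trimRowB to_rm ((PySem.List.pyRange 0 seq_len 3).length) v
      = rowC (!to_rm.contains "pos1") (!to_rm.contains "pos2") (!to_rm.contains "pos3")
          ((PySem.List.pyRange 0 seq_len 3).length) v := by
  unfold trimRowB maskB
  rw [PySem.List.slice_to_natCast]
  exact maskfilt_eq _ _ _ _ v h

-- the Pre_ bound at a sequence implies the last-codon in-range condition used by rowB_eq
theorem pre_bound (to_rm : List String) (seq_len : Int) (v : List Char)
    (hp : 0 < seq_len →
      (("pos1" ∈ to_rm) ∨ 3 * PySem.Int.floordiv (seq_len - 1) 3 < (v.length : Int)) ∧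
      (("pos2" ∈ to_rm) ∨ 3 * PySem.Int.floordiv (seq_len - 1) 3 + 1 < (v.length : Int)) ∧
      (("pos3" ∈ to_rm) ∨ 3 * PySem.Int.floordiv (seq_len - 1) 3 + 2 < (v.length : Int))) :
    0 < (PySem.List.pyRange 0 seq_len 3).length →
      ((!to_rm.contains "pos1") = true → 3 * ((PySem.List.pyRange 0 seq_len 3).length - 1) < v.length) ∧
      ((!to_rm.contains "pos2") = true → 3 * ((PySem.List.pyRange 0 seq_len 3).length - 1) + 1 < v.length) ∧
      ((!to_rm.contains "pos3") = true → 3 * ((PySem.List.pyRange 0 seq_len 3).length - 1) + 2 < v.length) := by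
  intro hn
  rw [PySem.List.pyRange_of_pos 0 seq_len (by norm_num)] at hn ⊢
  rw [List.length_map, List.length_range] at hn ⊢
  by_cases hs : 0 < seq_len
  · have hp' := hp hs
    rw [PySem.Int.floordiv_eq_ediv_of_pos (by norm_num)] at hp'
    simp only [hs, if_pos] at hn ⊢
    simp only [List.contains_eq_mem, Bool.not_eq_eq_eq_not, Bool.not_true, decide_eq_false_iff_not] at *
    refine ⟨fun hk => ?_, fun hk => ?_, fun hk => ?_⟩ <;>
      [rcases hp'.1 with h' | h'; rcases hp'.2.1 with h' | h'; rcases hp'.2.2 with h' | h'] <;>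
      first
        | exact absurd h' hk
        | omega
  · simp [hs] at hn

-- ===== VERDICT (by name: the statement is the Claim_ definition above) =====
theorem trim_columns_spec : Claim_equal_trim_columns := by
  intro to_rm aln seq_len _ hpre
  unfold Spec_trim_columns trim_columns trim_columns_alt
  by_cases hrm : to_rm = []
  · simp [hrm]
  · simp only [hrm, if_false]
    have hpre' := hpre hrm
    have hfold : aln.foldl (fun d (p : String × String) =>
        PySem.Dict.insert d p.1 (String.ofList (trimRowA to_rm seq_len p.2.toList))) PySem.Dict.empty
        = aln.foldl (fun d (p : String × String) =>
        PySem.Dict.insert d p.1 (String.ofList (trimRowB to_rm ((PySem.List.pyRange 0 seq_len 3).length) p.2.toList))) PySem.Dict.empty := by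
      apply PySem.List.foldl_congr_mem
      intro d p hp
      congr 1
      rw [rowA_eq, rowB_eq]
      apply pre_bound
      intro hs
      exact hpre'.2 hs p hp
    rw [hfold]
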